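-- pv_equiv track=rewrite | github.com/g-battaglia/qymanager | midi_tools/analyze_summer_lanes.py | organize_gt_by_instrument
-- ===== SOURCE A (Python) =====
-- def organize_gt_by_instrument(bar_notes: list) -> dict:
--     """Group notes in a bar by instrument (GM note number).
--
--     Returns: {note_number: [velocity_list_in_order]}
--     """
--     instruments = {}
--     for n in sorted(bar_notes, key=lambda x: x["tick_in_bar"]):
--         nn = n["note"]
--         if nn not in instruments:
--             instruments[nn] = []
--         instruments[nn].append(n["velocity"])
--     return instruments
-- ===== SOURCE B (Python) =====
-- def organize_gt_by_instrument(bar_notes: list) -> dict: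
--     """Group notes in a bar by instrument (GM note number).
--
--     Bucket variant: iterate the distinct tick values in increasing order and,
--     for each tick, scan the bar's notes in original order — no sort of the
--     note list itself is ever performed.
--     Returns: {note_number: [velocity_list_in_order]}
--     """
--     instruments = {}
--     for tick in sorted({n["tick_in_bar"] for n in bar_notes}):
--         for n in bar_notes:
--             if n["tick_in_bar"] == tick:
--                 instruments.setdefault(n["note"], []).append(n["velocity"])
--     return instruments
-- ===== Notes on version B (the rewrite author's own statement) =====
-- stated objective: alternative
-- what changed: B never sorts the note list: it iterates the distinct tick values in increasing order and scans the bar in original order for each tick (bucket traversal with setdefault), instead of A's sort-the-whole-list-then-group-on-the-fly.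
import Mathlib
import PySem

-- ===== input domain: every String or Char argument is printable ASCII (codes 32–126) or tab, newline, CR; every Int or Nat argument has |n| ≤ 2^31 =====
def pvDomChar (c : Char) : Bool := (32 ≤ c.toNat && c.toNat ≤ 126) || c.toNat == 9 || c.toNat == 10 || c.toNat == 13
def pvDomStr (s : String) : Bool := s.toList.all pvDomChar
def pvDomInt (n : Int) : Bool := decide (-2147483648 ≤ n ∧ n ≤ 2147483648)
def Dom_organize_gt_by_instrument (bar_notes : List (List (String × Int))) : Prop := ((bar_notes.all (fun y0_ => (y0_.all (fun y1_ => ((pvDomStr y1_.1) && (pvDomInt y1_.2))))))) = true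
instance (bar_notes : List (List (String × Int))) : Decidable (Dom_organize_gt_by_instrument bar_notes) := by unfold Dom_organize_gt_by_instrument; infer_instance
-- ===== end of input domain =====

-- B buckets the notes by the distinct tick values taken in increasing order instead of
-- sorting the whole note list and grouping on the fly; equal return value is proved.

-- shared dict-field accessors (n["tick_in_bar"], n["note"], n["velocity"]; KeyError excluded by Pre_)
def pvTick (n : List (String × Int)) : Int := PySem.Dict.getD ⟨n⟩ "tick_in_bar" 0
def pvNote (n : List (String × Int)) : Int := PySem.Dict.getD ⟨n⟩ "note" 0
def pvVel (n : List (String × Int)) : Int := PySem.Dict.getD ⟨n⟩ "velocity" 0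

-- ===== PORT A =====
-- loop body: if nn not in instruments: instruments[nn] = [] ; instruments[nn].append(n["velocity"])
def pvAStep (d : PySem.Dict Int (List Int)) (n : List (String × Int)) : PySem.Dict Int (List Int) :=
  let nn := pvNote n
  let d1 := if d.contains nn then d else d.insert nn ([] : List Int)
  d1.insert nn (d1.getD nn [] ++ [pvVel n])

def organize_gt_by_instrument (bar_notes : List (List (String × Int))) : List (Int × List Int) :=
  ((PySem.List.sorted bar_notes pvTick false).foldl pvAStep PySem.Dict.empty).items

-- ===== PORT B =====
-- instruments.setdefault(n["note"], []).append(n["velocity"])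
def pvBStep (d : PySem.Dict Int (List Int)) (n : List (String × Int)) : PySem.Dict Int (List Int) :=
  PySem.Dict.modify d (pvNote n) [] (fun vs => vs ++ [pvVel n])

def organize_gt_by_instrument_alt (bar_notes : List (List (String × Int))) : List (Int × List Int) :=
  ((PySem.List.sorted (PySem.Set.ofList (bar_notes.map pvTick)) (fun t => t) false).foldl
      (fun d t => bar_notes.foldl (fun d n => if pvTick n == t then pvBStep d n else d) d)
      PySem.Dict.empty).items

-- ===== PRECONDITION & SPEC =====
-- Pre_ excludes exactly the notes missing one of the three keys, on which A raises KeyError.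
def Pre_organize_gt_by_instrument (bar_notes : List (List (String × Int))) : Prop :=
  (bar_notes.all (fun n =>
    PySem.Dict.contains (⟨n⟩ : PySem.Dict String Int) "tick_in_bar" &&
    PySem.Dict.contains (⟨n⟩ : PySem.Dict String Int) "note" &&
    PySem.Dict.contains (⟨n⟩ : PySem.Dict String Int) "velocity")) = true
instance (bar_notes : List (List (String × Int))) : Decidable (Pre_organize_gt_by_instrument bar_notes) := by unfold Pre_organize_gt_by_instrument; infer_instance

def pvWitness_organize_gt_by_instrument : (List (List (String × Int))) :=
  [[("note", 38), ("tick_in_bar", 0), ("velocity", 100)], [("note", 42), ("tick_in_bar", 0), ("velocity", 64)]]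

def Spec_organize_gt_by_instrument (bar_notes : List (List (String × Int))) (out : List (Int × List Int)) : Prop := out = organize_gt_by_instrument_alt bar_notes
instance (bar_notes : List (List (String × Int))) (out : List (Int × List Int)) : Decidable (Spec_organize_gt_by_instrument bar_notes out) := by unfold Spec_organize_gt_by_instrument; infer_instance

-- ===== CLAIM (what is proved, stated in full; the proofs are below) =====
def Claim_equal_organize_gt_by_instrument : Prop := ∀ (bar_notes : List (List (String × Int))), Dom_organize_gt_by_instrument bar_notes → Pre_organize_gt_by_instrument bar_notes → Spec_organize_gt_by_instrument bar_notes (organize_gt_by_instrument bar_notes)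

-- ===== LEMMAS AND PROOFS =====

-- the two loop bodies perform the same dictionary update
theorem pvStep_eq (d : PySem.Dict Int (List Int)) (n : List (String × Int)) :
    pvAStep d n = pvBStep d n := by
  unfold pvAStep pvBStep PySem.Dict.modify
  by_cases h : d.contains (pvNote n) = true
  · simp [h]
  · simp only [h, if_neg, Bool.not_eq_true]
    rw [PySem.Dict.getD_insert_self, PySem.Dict.insert_insert_self,
        PySem.Dict.getD_of_not_contains (h := by simpa using h)]

theorem pvInsertBy_all_true {α : Type} (before : α → α → Bool) (x : α) (L : List α)
    (h : ∀ y ∈ L, before x y = true) :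
    PySem.List.insertBy before x L = x :: L := by
  cases L with
  | nil => rfl
  | cons y ys => simp [PySem.List.insertBy, h y (by simp)]

theorem pvInsertBy_append_left {α : Type} (before : α → α → Bool) (x : α) (L M : List α)
    (h : ∀ y ∈ L, before x y = false) :
    PySem.List.insertBy before x (L ++ M) = L ++ PySem.List.insertBy before x M := by
  induction L with
  | nil => rfl
  | cons y ys ih =>
      simp only [List.cons_append, PySem.List.insertBy, h y (by simp), Bool.false_eq_true,
        if_false]
      simp only [ih (fun z hz => h z (by simp [hz]))]

-- inserting a new element into a tick-bucketed list lands it at the end of its bucket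
theorem pvInsertBy_flatMap (x : List (String × Int)) (ts : List Int)
    (f : Int → List (List (String × Int)))
    (hp : ts.Pairwise (· < ·))
    (hf : ∀ u ∈ ts, ∀ n ∈ f u, pvTick n = u) :
    PySem.List.insertBy (fun a b => decide (pvTick a < pvTick b)) x (ts.flatMap f) =
      (if pvTick x ∈ ts
       then ts.flatMap (fun u => f u ++ if pvTick x == u then [x] else [])
       else (PySem.List.insertBy (fun a b => decide (a < b)) (pvTick x) ts).flatMap
              (fun u => if pvTick x == u then [x] else f u)) := by
  induction ts with
  | nil => simp [PySem.List.insertBy]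
  | cons u rest ih =>
      have hu : ∀ b ∈ rest, u < b := fun b hb => (List.pairwise_cons.mp hp).1 b hb
      have hrest : rest.Pairwise (· < ·) := (List.pairwise_cons.mp hp).2
      have hfu : ∀ n ∈ f u, pvTick n = u := hf u (by simp)
      have hfr : ∀ v ∈ rest, ∀ n ∈ f v, pvTick n = v := fun v hv => hf v (by simp [hv])
      have htail : ∀ y ∈ rest.flatMap f, u < pvTick y := by
        intro y hy
        rcases List.mem_flatMap.mp hy with ⟨v, hv, hyv⟩
        rw [hfr v hv y hyv]; exact hu v hv
      rcases lt_trichotomy (pvTick x) u with hlt | heq | hgt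
      · -- x goes in front of everything
        have hnot : pvTick x ∉ u :: rest := by
          intro hmem
          rcases List.mem_cons.mp hmem with h1 | h1
          · omega
          · exact absurd (hu _ h1) (by omega)
        have hne : ((pvTick x == u) = true) → False := by simp; omega
        have hins : PySem.List.insertBy (fun a b => decide (a < b)) (pvTick x) (u :: rest)
            = pvTick x :: u :: rest := by
          simp [PySem.List.insertBy, hlt]
        have hall : ∀ y ∈ f u ++ rest.flatMap f,
            (fun a b => decide (pvTick a < pvTick b)) x y = true := by
          intro y hy
          rcases List.mem_append.mp hy with h1 | h1
          · have := hfu y h1; simp [this]; omega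
          · have := htail y h1; simp; omega
        have h2 : rest.flatMap (fun v => if pvTick x == v then [x] else f v) = rest.flatMap f :=
          List.flatMap_congr (fun v hv => by rw [if_neg (by have := hu v hv; simp; omega)])
        rw [List.flatMap_cons, pvInsertBy_all_true (h := hall), if_neg hnot, hins]
        simp only [List.flatMap_cons]
        rw [h2, if_neg hne, if_pos (by simp)]
        simp
      · -- same tick: x lands at the end of u's bucket
        have hmem : pvTick x ∈ u :: rest := by simp [heq]
        have h2 : rest.flatMap (fun v => f v ++ if pvTick x == v then [x] else [])
            = rest.flatMap f :=
          List.flatMap_congr (fun v hv => by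
            rw [if_neg (by have := hu v hv; simp; omega), List.append_nil])
        rw [List.flatMap_cons, pvInsertBy_append_left
              (h := fun y hy => by have := hfu y hy; simp [this]; omega),
            pvInsertBy_all_true (h := fun y hy => by have := htail y hy; simp; omega),
            if_pos hmem]
        simp only [List.flatMap_cons]
        rw [h2, if_pos (by simp [heq])]
        simp
      · -- x belongs to a later bucket
        rw [List.flatMap_cons, pvInsertBy_append_left
              (h := fun y hy => by have := hfu y hy; simp [this]; omega),
            ih hrest hfr]
        have hneu : ((pvTick x == u) = true) → False := by simp; omega
        by_cases hmem : pvTick x ∈ rest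
        · rw [if_pos hmem, if_pos (by simp [hmem])]
          simp only [List.flatMap_cons]
          rw [if_neg hneu, List.append_nil]
        · have hnot : pvTick x ∉ u :: rest := by
            intro h1; rcases List.mem_cons.mp h1 with h2 | h2
            · omega
            · exact hmem h2
          have hins : PySem.List.insertBy (fun a b => decide (a < b)) (pvTick x) (u :: rest)
              = u :: PySem.List.insertBy (fun a b => decide (a < b)) (pvTick x) rest := by
            simp only [PySem.List.insertBy]
            rw [if_neg (by simp; omega)]
          rw [if_neg hmem, if_neg hnot, hins]
          simp only [List.flatMap_cons]
          rw [if_neg hneu]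

-- the stable sort by tick is the concatenation of the per-tick filters, ticks increasing
theorem pvSorted_bucket (xs : List (List (String × Int))) :
    PySem.List.sorted xs pvTick false
      = (PySem.List.sorted (PySem.Set.ofList (xs.map pvTick)) (fun t => t) false).flatMap
          (fun t => xs.filter (fun n => pvTick n == t)) := by
  induction xs using List.reverseRecOn with
  | nil => rfl
  | append_singleton xs x ih =>
      have hstep : PySem.List.sorted (xs ++ [x]) pvTick false
          = PySem.List.insertBy (fun a b => decide (pvTick a < pvTick b)) x
              (PySem.List.sorted xs pvTick false) := by
        rw [PySem.List.sorted_eq_foldl_insertBy, PySem.List.sorted_eq_foldl_insertBy,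
          List.foldl_append]
        rfl
      have hset : PySem.Set.ofList ((xs ++ [x]).map pvTick)
          = PySem.Set.add (PySem.Set.ofList (xs.map pvTick)) (pvTick x) := by
        rw [List.map_append, PySem.Set.ofList_eq_foldl, PySem.Set.ofList_eq_foldl,
          List.foldl_append]
        rfl
      rw [hstep, ih, pvInsertBy_flatMap x _ _
        (PySem.List.sorted_ofList_pairwise_lt (xs.map pvTick))
        (fun u hu n hn => by
          have := List.mem_filter.mp hn
          simpa using this.2)]
      by_cases hm : pvTick x ∈ xs.map pvTick
      · have hmS : pvTick x ∈ PySem.Set.ofList (xs.map pvTick) := by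
          rw [PySem.Set.mem_ofList]; exact hm
        have hadd : PySem.Set.add (PySem.Set.ofList (xs.map pvTick)) (pvTick x)
            = PySem.Set.ofList (xs.map pvTick) := by
          simp [PySem.Set.add, PySem.Set.contains, hmS]
        rw [if_pos (by rw [PySem.List.mem_sorted]; exact hmS), hset, hadd]
        refine List.flatMap_congr (fun u hu => ?_)
        rw [List.filter_append, List.filter_singleton, Bool.cond_eq_ite]
      · have hmS : pvTick x ∉ PySem.Set.ofList (xs.map pvTick) := by
          rw [PySem.Set.mem_ofList]; exact hm
        have hadd : PySem.Set.add (PySem.Set.ofList (xs.map pvTick)) (pvTick x)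
            = PySem.Set.ofList (xs.map pvTick) ++ [pvTick x] := by
          simp [PySem.Set.add, PySem.Set.contains, hmS]
        have hins : PySem.List.sorted (PySem.Set.ofList (xs.map pvTick) ++ [pvTick x])
              (fun t => t) false
            = PySem.List.insertBy (fun a b => decide (a < b)) (pvTick x)
                (PySem.List.sorted (PySem.Set.ofList (xs.map pvTick)) (fun t => t) false) := by
          rw [PySem.List.sorted_eq_foldl_insertBy, PySem.List.sorted_eq_foldl_insertBy,
            List.foldl_append]
          rfl
        rw [if_neg (by rw [PySem.List.mem_sorted]; exact hmS), hset, hadd, hins]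
        refine List.flatMap_congr (fun u hu => ?_)
        rcases (PySem.List.mem_insertBy _ _ _ _).mp hu with h1 | h1
        · subst h1
          have hnil : xs.filter (fun n => pvTick n == pvTick x) = [] := by
            rw [List.filter_eq_nil_iff]
            intro n hn hc
            have hnx : pvTick n = pvTick x := by simpa using hc
            exact hm (hnx ▸ List.mem_map_of_mem (f := pvTick) hn)
          rw [if_pos (by simp), List.filter_append, hnil, List.filter_singleton,
            Bool.cond_eq_ite, if_pos (by simp)]
          rfl
        · rw [PySem.List.mem_sorted] at h1
          have hne : pvTick x ≠ u := fun h2 => hmS (h2 ▸ h1)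
          rw [if_neg (by simpa using hne), List.filter_append, List.filter_singleton,
            Bool.cond_eq_ite, if_neg (by simpa using hne)]
          simp

theorem pvFoldl_flatMap {α β γ : Type} (l : List α) (g : α → List β) (f : γ → β → γ) (i : γ) :
    (l.flatMap g).foldl f i = l.foldl (fun a t => (g t).foldl f a) i := by
  induction l generalizing i with
  | nil => rfl
  | cons a l ih => simp [List.flatMap_cons, List.foldl_append, ih]

-- ===== VERDICT (by name: the statement is the Claim_ definition above) =====
theorem organize_gt_by_instrument_spec : Claim_equal_organize_gt_by_instrument := by
  intro bar_notes _ _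
  unfold Spec_organize_gt_by_instrument
  unfold organize_gt_by_instrument organize_gt_by_instrument_alt
  rw [pvSorted_bucket, pvFoldl_flatMap]
  have hstep : pvAStep = pvBStep := funext fun d => funext fun n => pvStep_eq d n
  simp only [PySem.List.foldl_if_eq_foldl_filter, hstep]
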